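-- pv_equiv track=rewrite | github.com/openjdk/trees | tests/verlist.py | _lastmicro
-- ===== SOURCE A (Python) =====
-- def _lastmicro(tlist):
--     lastmicro = ''
--     tags = [tlist[0]] # always include the first tag
--     for tag in tlist[1:]:
--         pos = tag.find('.')
--         if pos > 0 and tag.find('.', pos + 1) > 0:
--             lastmicro = tag
--         else:
--             if lastmicro:
--                 tags.append(lastmicro)
--                 lastmicro = ''
--             tags.append(tag)
--     if lastmicro:
--         tags.append(lastmicro)
--     return tags
-- ===== SOURCE B (Python) =====
-- def _ismicro(tag):
--     pos = tag.find('.')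
--     return pos > 0 and tag.find('.', pos + 1) > 0
--
--
-- def _lastmicro(tlist):
--     tags = [tlist[0]]  # always include the first tag
--     rest = tlist[1:]
--     # keep a tag unless it and its successor are both micro versions;
--     # the final tag of rest has no successor and is always kept
--     for tag, nxt in zip(rest, rest[1:]):
--         if not (_ismicro(tag) and _ismicro(nxt)):
--             tags.append(tag)
--     if rest:
--         tags.append(rest[-1])
--     return tags
-- ===== Notes on version B (the rewrite author's own statement) =====
-- stated objective: idiomatic
-- what changed: B replaces A's pending-lastmicro state machine with a stateless one-pass lookahead: zip each tag of tlist[1:] with its successor and keep a tag unless both it and its successor are micro versions, always keeping the final tag.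
-- outside the precondition, e.g. on _lastmicro([]): A raises IndexError, B raises IndexError
import Mathlib
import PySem

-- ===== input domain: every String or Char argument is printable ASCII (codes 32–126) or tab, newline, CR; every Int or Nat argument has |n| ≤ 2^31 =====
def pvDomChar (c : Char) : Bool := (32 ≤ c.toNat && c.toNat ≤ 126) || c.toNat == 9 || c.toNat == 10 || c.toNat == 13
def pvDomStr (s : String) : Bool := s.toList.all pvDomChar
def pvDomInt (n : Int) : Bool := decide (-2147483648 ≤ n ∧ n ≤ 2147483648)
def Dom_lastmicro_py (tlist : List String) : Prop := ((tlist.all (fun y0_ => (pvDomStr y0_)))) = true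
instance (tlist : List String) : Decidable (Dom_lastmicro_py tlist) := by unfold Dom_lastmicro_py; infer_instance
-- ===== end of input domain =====

-- B is a stateless lookahead pass (keep a tag unless it and its successor are both
-- micro versions) instead of A's pending-lastmicro state machine; same cost, plainer.

-- pos = tag.find('.'); pos > 0 and tag.find('.', pos + 1) > 0   (shared helper, used by both ports)
def pvIsMicro (tag : String) : Bool :=
  let pos := PySem.Str.find tag "."
  pos > 0 && PySem.Str.findFrom tag "." (pos + 1) none > 0

-- ===== PORT A =====
-- A's loop body, step for step (st = (lastmicro, tags))
def pvStepA (st : String × List String) (tag : String) : String × List String :=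
  if pvIsMicro tag then (tag, st.2)
  else if st.1 ≠ "" then ("", st.2 ++ [st.1, tag])
  else (st.1, st.2 ++ [tag])

def lastmicro_py (tlist : List String) : List String :=
  match tlist with
  | [] => []  -- tlist[0] raises IndexError in Python: excluded by Pre_
  | t0 :: rest =>
    let st := rest.foldl pvStepA ("", [t0])
    if st.1 ≠ "" then st.2 ++ [st.1] else st.2

-- ===== PORT B =====
-- B's loop body over (tag, nxt) pairs
def pvStepB (tags : List String) (p : String × String) : List String :=
  if !(pvIsMicro p.1 && pvIsMicro p.2) then tags ++ [p.1] else tags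

def lastmicro_py_alt (tlist : List String) : List String :=
  match tlist with
  | [] => []  -- tlist[0] raises IndexError in Python: excluded by Pre_
  | t0 :: rest =>
    let tags := ((rest.zip (rest.drop 1)).foldl pvStepB [t0])
    match rest.getLast? with  -- if rest: tags.append(rest[-1])
    | some t => tags ++ [t]
    | none => tags

-- ===== PRECONDITION & SPEC =====
-- Pre_: tlist must be nonempty; on [] the Python A raises IndexError at tlist[0].
def Pre_lastmicro_py (tlist : List String) : Prop := tlist ≠ []
instance (tlist : List String) : Decidable (Pre_lastmicro_py tlist) := by unfold Pre_lastmicro_py; infer_instance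
def pvWitness_lastmicro_py : List String := ["1.2.3", "1.2.4", "2.0"]

def Spec_lastmicro_py (tlist : List String) (out : List String) : Prop := out = lastmicro_py_alt tlist
instance (tlist : List String) (out : List String) : Decidable (Spec_lastmicro_py tlist out) := by unfold Spec_lastmicro_py; infer_instance

-- ===== CLAIM (what is proved, stated in full; the proofs are below) =====
def Claim_equal_lastmicro_py : Prop := ∀ (tlist : List String), Dom_lastmicro_py tlist → Pre_lastmicro_py tlist → Spec_lastmicro_py tlist (lastmicro_py tlist)

-- ===== LEMMAS AND PROOFS =====

-- recursive characterisation of A's loop (including the final flush of lastmicro)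
def pvLoopA : String → List String → List String
  | lm, [] => if lm ≠ "" then [lm] else []
  | lm, t :: ts =>
    if pvIsMicro t then pvLoopA t ts
    else if lm ≠ "" then lm :: t :: pvLoopA "" ts
    else t :: pvLoopA "" ts

-- recursive characterisation of B's filter over the zipped pairs
def pvZf : List (String × String) → List String
  | [] => []
  | p :: ps => (if !(pvIsMicro p.1 && pvIsMicro p.2) then [p.1] else []) ++ pvZf ps

def pvEndB (ts : List String) : List String :=
  match ts.getLast? with
  | some t => [t]
  | none => []

theorem pvIsMicro_ne_empty {lm : String} (h : pvIsMicro lm = true) : lm ≠ "" := by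
  intro he; subst he; exact absurd h (by decide)

theorem pvFoldA_acc (ts : List String) : ∀ lm tags,
    (if (ts.foldl pvStepA (lm, tags)).1 ≠ "" then
       (ts.foldl pvStepA (lm, tags)).2 ++ [(ts.foldl pvStepA (lm, tags)).1]
     else (ts.foldl pvStepA (lm, tags)).2) = tags ++ pvLoopA lm ts := by
  induction ts with
  | nil =>
    intro lm tags
    simp only [List.foldl_nil, pvLoopA]
    split <;> simp
  | cons t ts ih =>
    intro lm tags
    simp only [List.foldl_cons, pvStepA, pvLoopA]
    by_cases hm : pvIsMicro t = true
    · simp [hm, ih]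
    · by_cases hl : lm = ""
      · simp [hm, hl, ih]
      · simp [hm, hl, ih]

theorem pvFoldB_acc (ps : List (String × String)) : ∀ tags,
    ps.foldl pvStepB tags = tags ++ pvZf ps := by
  induction ps with
  | nil => simp [pvZf]
  | cons p ps ih =>
    intro tags
    simp only [List.foldl_cons, pvStepB, pvZf]
    split <;> simp [ih]

theorem pvMain (ts : List String) :
    (pvZf (ts.zip (ts.drop 1)) ++ pvEndB ts = pvLoopA "" ts) ∧
    (∀ lm, pvIsMicro lm = true →
      pvZf ((lm :: ts).zip ts) ++ pvEndB (lm :: ts) = pvLoopA lm ts) := by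
  induction ts with
  | nil =>
    refine ⟨by simp [pvZf, pvEndB, pvLoopA], ?_⟩
    intro lm hlm
    simp [pvZf, pvEndB, pvLoopA, pvIsMicro_ne_empty hlm]
  | cons t ts ih =>
    obtain ⟨ih1, ih2⟩ := ih
    have h1 : pvZf ((t :: ts).zip ts) ++ pvEndB (t :: ts) = pvLoopA "" (t :: ts) := by
      by_cases hm : pvIsMicro t = true
      · rw [ih2 t hm]; simp [pvLoopA, hm]
      · cases ts with
        | nil => simp [pvZf, pvEndB, pvLoopA, hm]
        | cons u ts' =>
          have ih1' : pvZf ((u :: ts').zip ts') ++ pvEndB (u :: ts') = pvLoopA "" (u :: ts') := by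
            simpa [List.drop_one] using ih1
          have he : pvEndB (t :: u :: ts') = pvEndB (u :: ts') := by simp [pvEndB]
          have hz : pvZf ((t :: u :: ts').zip (u :: ts'))
              = [t] ++ pvZf ((u :: ts').zip ts') := by simp [pvZf, hm]
          rw [hz, he, List.append_assoc, ih1']
          simp [pvLoopA, hm]
    refine ⟨by simpa [List.drop_one] using h1, ?_⟩
    intro lm hlm
    have hlm' := pvIsMicro_ne_empty hlm
    have he : pvEndB (lm :: t :: ts) = pvEndB (t :: ts) := by simp [pvEndB]
    by_cases hm : pvIsMicro t = true
    · have hz : pvZf ((lm :: t :: ts).zip (t :: ts)) = pvZf ((t :: ts).zip ts) := by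
        simp [pvZf, hlm, hm]
      rw [hz, he, ih2 t hm]
      simp [pvLoopA, hm]
    · have hz : pvZf ((lm :: t :: ts).zip (t :: ts))
          = [lm] ++ pvZf ((t :: ts).zip ts) := by simp [pvZf, hm]
      rw [hz, he, List.append_assoc, h1]
      simp [pvLoopA, hm, hlm']

-- ===== VERDICT (by name: the statement is the Claim_ definition above) =====
theorem lastmicro_py_spec : Claim_equal_lastmicro_py := by
  intro tlist _ hpre
  unfold Spec_lastmicro_py
  match tlist with
  | [] => exact absurd rfl hpre
  | t0 :: rest =>
    have hA : lastmicro_py (t0 :: rest) = [t0] ++ pvLoopA "" rest := by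
      rw [show lastmicro_py (t0 :: rest)
          = (if (rest.foldl pvStepA ("", [t0])).1 ≠ "" then
               (rest.foldl pvStepA ("", [t0])).2 ++ [(rest.foldl pvStepA ("", [t0])).1]
             else (rest.foldl pvStepA ("", [t0])).2) from rfl]
      exact pvFoldA_acc rest "" [t0]
    have hB : lastmicro_py_alt (t0 :: rest)
        = [t0] ++ (pvZf (rest.zip (rest.drop 1)) ++ pvEndB rest) := by
      rw [show lastmicro_py_alt (t0 :: rest)
          = (match rest.getLast? with
             | some t => (rest.zip (rest.drop 1)).foldl pvStepB [t0] ++ [t]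
             | none => (rest.zip (rest.drop 1)).foldl pvStepB [t0]) from rfl]
      cases hg : rest.getLast? <;> simp [pvEndB, hg, pvFoldB_acc]
    rw [hA, hB, (pvMain rest).1]
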